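-- pv_equiv track=rewrite | github.com/jonkmatsumo/text2sql | src/dal/keyset_pagination.py | _candidate_unique_suffixes
-- ===== SOURCE A (Python) =====
-- from typing import Any, Dict, List, Optional, Protocol, runtime_checkable
--
-- def _candidate_unique_suffixes(
--     resolved_order_columns: List[tuple[str, str]],
-- ) -> List[tuple[str, List[str]]]:
--     suffixes: List[tuple[str, List[str]]] = []
--     for start_idx in range(len(resolved_order_columns) - 1, -1, -1):
--         suffix = resolved_order_columns[start_idx:]
--         if not suffix:
--             continue
--         suffix_table = suffix[0][0]
--         if any(table_name != suffix_table for table_name, _ in suffix):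
--             continue
--         suffix_columns = [column_name for _, column_name in suffix]
--         suffixes.append((suffix_table, suffix_columns))
--     return suffixes
-- ===== SOURCE B (Python) =====
-- def _candidate_unique_suffixes(resolved_order_columns):
--     suffixes = []
--     if not resolved_order_columns:
--         return suffixes
--     t = resolved_order_columns[-1][0]
--     acc = []
--     for table_name, column_name in reversed(resolved_order_columns):
--         if table_name != t:
--             break
--         acc = [column_name] + acc
--         suffixes.append((t, acc))
--     return suffixes
-- ===== Notes on version B (the rewrite author's own statement) =====
-- stated objective: alternative
-- what changed: Replaced the per-start-index full-suffix slicing and whole-suffix table re-scan with a single backward pass that maintains a growing column accumulator and stops at the first differing table.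
import Mathlib
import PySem

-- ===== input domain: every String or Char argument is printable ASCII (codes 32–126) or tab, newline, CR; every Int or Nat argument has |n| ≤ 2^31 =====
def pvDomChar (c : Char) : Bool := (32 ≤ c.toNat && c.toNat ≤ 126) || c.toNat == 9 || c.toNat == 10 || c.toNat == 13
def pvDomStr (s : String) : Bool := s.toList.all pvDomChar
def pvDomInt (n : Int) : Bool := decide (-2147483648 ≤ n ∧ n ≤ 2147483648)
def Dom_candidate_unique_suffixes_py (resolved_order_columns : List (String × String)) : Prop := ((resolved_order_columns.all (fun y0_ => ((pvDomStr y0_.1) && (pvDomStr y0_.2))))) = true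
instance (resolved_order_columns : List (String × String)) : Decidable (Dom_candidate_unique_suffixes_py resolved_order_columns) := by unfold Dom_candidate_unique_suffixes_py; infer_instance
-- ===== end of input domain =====

-- B replaces A's per-start-index suffix slicing and whole-suffix table re-scan by one
-- backward pass with a growing column accumulator that stops at the first differing table
-- (objective: alternative algorithm; same return value).

-- ===== PORT A =====
-- literal transliteration of A: for start_idx in range(len-1, -1, -1): slice, emptiness
-- guard, any-scan over the suffix, append. (suffix[0] is taken with pyGetD: the guard
-- 'if not suffix: continue' has already ensured the index is in range.)
def candidate_unique_suffixes_py (resolved_order_columns : List (String × String)) : List (String × List String) :=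
  (PySem.List.pyRange (PySem.List.len resolved_order_columns - 1) (-1) (-1)).foldl
    (fun suffixes start_idx =>
      let suffix := PySem.List.slice resolved_order_columns (some start_idx) none
      if suffix = [] then suffixes
      else
        let suffix_table := (PySem.List.pyGetD suffix 0 ("", "")).1
        if suffix.any (fun p => p.1 != suffix_table) then suffixes
        else suffixes ++ [(suffix_table, suffix.map (fun p => p.2))])
    []

-- ===== PORT B =====
-- B's loop over reversed(resolved_order_columns): emit (t, acc) while the table still
-- equals t, break at the first mismatch; acc = [column_name] + acc each step.
def pvAltGo (t : String) : List (String × String) → List String → List (String × List String)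
  | [], _ => []
  | (table_name, column_name) :: rest, acc =>
    if table_name != t then []
    else
      let acc' := column_name :: acc
      (t, acc') :: pvAltGo t rest acc'

def candidate_unique_suffixes_py_alt (resolved_order_columns : List (String × String)) : List (String × List String) :=
  match resolved_order_columns.reverse with
  | [] => []
  | (t, c) :: rest => pvAltGo t ((t, c) :: rest) []

-- ===== PRECONDITION & SPEC =====
def Spec_candidate_unique_suffixes_py (resolved_order_columns : List (String × String)) (out : List (String × List String)) : Prop := out = candidate_unique_suffixes_py_alt resolved_order_columns
instance (resolved_order_columns : List (String × String)) (out : List (String × List String)) : Decidable (Spec_candidate_unique_suffixes_py resolved_order_columns out) := by unfold Spec_candidate_unique_suffixes_py; infer_instance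

-- ===== CLAIM (what is proved, stated in full; the proofs are below) =====
def Claim_equal_candidate_unique_suffixes_py : Prop := ∀ (resolved_order_columns : List (String × String)), Dom_candidate_unique_suffixes_py resolved_order_columns → Spec_candidate_unique_suffixes_py resolved_order_columns (candidate_unique_suffixes_py resolved_order_columns)

-- ===== LEMMAS AND PROOFS =====

-- A's loop body, named (zeta-reduced form of the foldl body in the port of A).
def pvABody (ys : List (String × String)) (suffixes : List (String × List String))
    (start_idx : Int) : List (String × List String) :=
  if PySem.List.slice ys (some start_idx) none = [] then suffixes
  else
    if (PySem.List.slice ys (some start_idx) none).any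
        (fun p => p.1 != (PySem.List.pyGetD (PySem.List.slice ys (some start_idx) none) 0 ("", "")).1)
      then suffixes
      else suffixes ++
        [((PySem.List.pyGetD (PySem.List.slice ys (some start_idx) none) 0 ("", "")).1,
          (PySem.List.slice ys (some start_idx) none).map (fun p => p.2))]

theorem A_eq_body (ys : List (String × String)) :
    candidate_unique_suffixes_py ys =
      (PySem.List.pyRange (PySem.List.len ys - 1) (-1) (-1)).foldl (pvABody ys) [] := rfl

theorem pyRange_shift (n : Int) (hn : 0 ≤ n) :
    PySem.List.pyRange 1 (n + 1) 1 = (PySem.List.pyRange 0 n 1).map (fun i => i + 1) := by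
  rw [PySem.List.pyRange_one, PySem.List.pyRange_one, List.map_map]
  have h : (n + 1 - 1).toNat = (n - 0).toNat := by omega
  rw [h]
  exact List.map_congr_left (fun k _ => by simp [Function.comp]; ring)

theorem body_shift (x : String × String) (xs : List (String × String))
    (acc : List (String × List String)) (i : Int) (hi : 0 ≤ i) :
    pvABody (x :: xs) acc (i + 1) = pvABody xs acc i := by
  have h1 : PySem.List.slice (x :: xs) (some (i + 1)) none = xs.drop i.toNat := by
    rw [PySem.List.slice_from _ (by omega : (0:Int) ≤ i + 1)]
    have h : (i + 1).toNat = i.toNat + 1 := by omega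
    rw [h, List.drop_succ_cons]
  have h2 : PySem.List.slice xs (some i) none = xs.drop i.toNat :=
    PySem.List.slice_from xs hi
  simp only [pvABody, h1, h2]

theorem body_zero (x : String × String) (xs : List (String × String))
    (S : List (String × List String)) :
    pvABody (x :: xs) S 0 =
      S ++ (if (x :: xs).any (fun p => p.1 != x.1) then []
            else [(x.1, (x :: xs).map (fun p => p.2))]) := by
  simp only [pvABody, PySem.List.slice_zero_start, PySem.List.slice_none_none,
    PySem.List.pyGetD_zero_cons]
  rw [if_neg (List.cons_ne_nil x xs)]
  split <;> simp

theorem A_rec (x : String × String) (xs : List (String × String)) :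
    candidate_unique_suffixes_py (x :: xs) =
      candidate_unique_suffixes_py xs ++
        (if (x :: xs).any (fun p => p.1 != x.1) then []
          else [(x.1, (x :: xs).map (fun p => p.2))]) := by
  have hn : (0 : Int) ≤ (xs.length : Int) := by positivity
  have h01 : (-1 : Int) + 1 = 0 := by norm_num
  have e1 : PySem.List.pyRange (PySem.List.len (x :: xs) - 1) (-1) (-1)
      = ((PySem.List.pyRange 0 (xs.length : Int) 1).map (fun i => i + 1)).reverse ++ [0] := by
    have hl : PySem.List.len (x :: xs) - 1 = (xs.length : Int) := by
      simp [PySem.List.len_eq]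
    rw [hl, PySem.List.pyRange_neg_one_eq_reverse, h01,
        PySem.List.pyRange_one_cons (by omega), List.reverse_cons,
        show (0 : Int) + 1 = 1 by norm_num, pyRange_shift _ hn]
  have e2 : PySem.List.pyRange (PySem.List.len xs - 1) (-1) (-1)
      = (PySem.List.pyRange 0 (xs.length : Int) 1).reverse := by
    rw [PySem.List.len_eq, PySem.List.pyRange_neg_one_eq_reverse, h01,
        show ((xs.length : Int) - 1) + 1 = (xs.length : Int) by ring]
  have hfold : ((PySem.List.pyRange 0 (xs.length : Int) 1).reverse).foldl
        (fun acc b => pvABody (x :: xs) acc (b + 1)) []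
      = ((PySem.List.pyRange 0 (xs.length : Int) 1).reverse).foldl (pvABody xs) [] := by
    refine PySem.List.foldl_congr_mem _ _ _ _ ?_
    intro acc i hi
    rw [List.mem_reverse, PySem.List.mem_pyRange_one] at hi
    exact body_shift x xs acc i hi.1
  rw [A_eq_body, A_eq_body, e1, e2, List.foldl_append, ← List.map_reverse, List.foldl_map]
  rw [hfold]
  simp only [List.foldl_cons, List.foldl_nil]
  rw [body_zero]

theorem pvAltGo_append (t : String) (rs : List (String × String)) (y : String × String)
    (acc : List String) :
    pvAltGo t (rs ++ [y]) acc =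
      pvAltGo t rs acc ++
        (if rs.all (fun p => p.1 == t) && (y.1 == t)
          then [(t, y.2 :: ((rs.map (fun p => p.2)).reverse ++ acc))] else []) := by
  induction rs generalizing acc with
  | nil => simp [pvAltGo]
  | cons hd tl ih =>
    obtain ⟨tb, c⟩ := hd
    by_cases h : tb = t
    · subst h
      simp only [List.cons_append, pvAltGo, bne_self_eq_false, ih]
      simp only [List.map_cons, List.reverse_cons,
        List.append_assoc, List.singleton_append, List.all_cons]
      split <;> split <;> simp_all <;> tauto
    · simp [pvAltGo, pvAltGo.eq_def, bne, h]

theorem B_rec (x : String × String) (xs : List (String × String)) :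
    candidate_unique_suffixes_py_alt (x :: xs) =
      candidate_unique_suffixes_py_alt xs ++
        (if (x :: xs).any (fun p => p.1 != x.1) then []
          else [(x.1, (x :: xs).map (fun p => p.2))]) := by
  cases hx : xs.reverse with
  | nil =>
    have hxs : xs = [] := by simpa using congrArg List.reverse hx
    subst hxs
    simp [candidate_unique_suffixes_py_alt, pvAltGo]
  | cons hd rest =>
    obtain ⟨t, c⟩ := hd
    have hxs : xs = ((t, c) :: rest).reverse := by rw [← hx, List.reverse_reverse]
    have hrev : (x :: xs).reverse = (t, c) :: (rest ++ [x]) := by simp [hx]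
    have LHSeq : candidate_unique_suffixes_py_alt (x :: xs)
        = pvAltGo t (((t, c) :: rest) ++ [x]) [] := by
      rw [candidate_unique_suffixes_py_alt, hrev]
      rfl
    have RHSeq : candidate_unique_suffixes_py_alt xs = pvAltGo t ((t, c) :: rest) [] := by
      rw [candidate_unique_suffixes_py_alt, hx]
    rw [LHSeq, RHSeq, pvAltGo_append]
    congr 1
    subst hxs
    have hcond : ((((t, c) :: rest).all fun p => p.1 == t) && x.1 == t)
        = !((x :: ((t, c) :: rest).reverse).any fun p => p.1 != x.1) := by
      by_cases hx1 : x.1 = t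
      · subst hx1
        simp [List.all_eq_not_any_not, bne]
      · simp [beq_eq_false_iff_ne.mpr hx1, bne, Ne.symm hx1]
    rw [hcond]
    cases hany : ((x :: ((t, c) :: rest).reverse).any fun p => p.1 != x.1) with
    | true => simp
    | false =>
      simp only [Bool.not_false, if_true, Bool.false_eq_true, if_false]
      have hx1 : t = x.1 := by
        simp only [List.any_cons, List.any_reverse, List.any_eq_false,
          Bool.or_eq_false_iff, bne_iff_ne, ne_eq, not_not] at hany
        simpa [bne] using hany.2.1
      subst hx1
      simp

theorem AB_eq (xs : List (String × String)) :
    candidate_unique_suffixes_py xs = candidate_unique_suffixes_py_alt xs := by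
  induction xs with
  | nil => decide
  | cons x xs ih => rw [A_rec, B_rec, ih]

-- ===== VERDICT (by name: the statement is the Claim_ definition above) =====
theorem candidate_unique_suffixes_py_spec : Claim_equal_candidate_unique_suffixes_py := by
  intro xs _hdom
  unfold Spec_candidate_unique_suffixes_py
  exact AB_eq xs
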